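-- pv_equiv track=rewrite | github.com/nithish63-creator/SmartProctor | SmartProctor/decision/fusion.py | analyze_by_rules
-- ===== SOURCE A (Python) =====
-- def analyze_by_rules(incidents, logs):
--     """ACTUAL RULE-BASED ANALYSIS - This makes the real decisions"""
--
--     # Count incidents by type
--     incident_counts = {
--         'cell_phone': 0,
--         'electronics': 0,
--         'multiple_person': 0,
--         'face_mismatch': 0,
--         'speech': 0,
--         'side_glance': 0,
--         'object_warning': 0,
--         'ai_looking_away': 0,
--         'total_incidents': 0
--     }
--
--     electronics_keywords = {"laptop", "tablet", "headphones", "earphones", "remote", "mouse", "keyboard"}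
--
--     for _, ts, severity, reason, evidence in incidents:
--         incident_counts['total_incidents'] += 1
--         r = (reason or "").lower()
--
--         if "cell_phone" in r or "phone" in r:
--             incident_counts['cell_phone'] += 1
--         elif any(k in r for k in electronics_keywords):
--             incident_counts['electronics'] += 1
--         elif "multi" in r or "multiple_person" in r:
--             incident_counts['multiple_person'] += 1
--         elif "face_mismatch" in r:
--             incident_counts['face_mismatch'] += 1
--         elif "speech" in r:
--             incident_counts['speech'] += 1
--         elif "side_glance" in r or "excessive_side_glances" in r:
--             incident_counts['side_glance'] += 1
--         elif "object_warning" in r: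
--             incident_counts['object_warning'] += 1
--         elif "ai_looking_away" in r or "lstm" in r:
--             incident_counts['ai_looking_away'] += 1
--
--     return incident_counts
-- ===== SOURCE B (Python) =====
-- _RULES = [
--     ("cell_phone", ("cell_phone", "phone")),
--     ("electronics", ("laptop", "tablet", "headphones", "earphones", "remote", "mouse", "keyboard")),
--     ("multiple_person", ("multi", "multiple_person")),
--     ("face_mismatch", ("face_mismatch",)),
--     ("speech", ("speech",)),
--     ("side_glance", ("side_glance", "excessive_side_glances")),
--     ("object_warning", ("object_warning",)),
--     ("ai_looking_away", ("ai_looking_away", "lstm")),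
-- ]
--
--
-- def analyze_by_rules(incidents, logs):
--     """Staged sieve: each rule in turn filters the pool of still-unmatched reasons;
--     its count is the number it removes from the pool."""
--     counts = {cat: 0 for cat, _ in _RULES}
--     counts['total_incidents'] = len(incidents)
--     remaining = [(inc[3] or "").lower() for inc in incidents]
--     for cat, kws in _RULES:
--         matched = [r for r in remaining if any(k in r for k in kws)]
--         remaining = [r for r in remaining if not any(k in r for k in kws)]
--         counts[cat] = len(matched)
--     return counts
-- ===== Notes on version B (the rewrite author's own statement) =====
-- stated objective: alternative
-- what changed: B replaces A's single pass with a per-row elif chain and running counters by a staged sieve: the reasons are lowercased once into a pool, then each rule in priority order filters the pool, counting and removing the reasons it matches, so each category's count is the size removed at its stage.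
import Mathlib
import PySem

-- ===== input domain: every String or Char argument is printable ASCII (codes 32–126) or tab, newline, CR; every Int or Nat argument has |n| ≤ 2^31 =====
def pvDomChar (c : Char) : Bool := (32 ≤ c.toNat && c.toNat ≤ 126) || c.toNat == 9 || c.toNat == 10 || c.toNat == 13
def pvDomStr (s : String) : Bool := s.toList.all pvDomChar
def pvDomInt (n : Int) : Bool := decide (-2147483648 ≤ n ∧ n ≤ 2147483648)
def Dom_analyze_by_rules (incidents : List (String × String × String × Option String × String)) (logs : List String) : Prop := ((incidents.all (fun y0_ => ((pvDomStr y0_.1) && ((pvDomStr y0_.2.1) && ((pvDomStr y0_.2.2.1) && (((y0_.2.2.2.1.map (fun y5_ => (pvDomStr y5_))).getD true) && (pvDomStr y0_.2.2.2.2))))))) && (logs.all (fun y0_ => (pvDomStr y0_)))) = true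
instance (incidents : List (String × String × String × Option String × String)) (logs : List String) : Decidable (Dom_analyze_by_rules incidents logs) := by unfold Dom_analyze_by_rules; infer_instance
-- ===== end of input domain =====

-- B replaces A's one pass with an elif chain and running counters by a staged sieve over a
-- pool of lowercased reasons: each rule in priority order counts and removes the reasons it
-- matches; objective: alternative decomposition, not faster.

-- ===== PORT A =====
def pvElectronicsKeywords : PySem.Set String :=
  PySem.Set.ofList ["laptop", "tablet", "headphones", "earphones", "remote", "mouse", "keyboard"]

-- the body of A's for-loop, as a fold step (dict state → incident → dict state)
def pvStepA (d : PySem.Dict String Int)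
    (inc : String × String × String × Option String × String) : PySem.Dict String Int :=
  let d := d.modify "total_incidents" 0 (· + 1)
  let r := PySem.Str.lower (inc.2.2.2.1.getD "")
  if PySem.Str.isIn "cell_phone" r || PySem.Str.isIn "phone" r then
    d.modify "cell_phone" 0 (· + 1)
  else if pvElectronicsKeywords.any (fun k => PySem.Str.isIn k r) then
    d.modify "electronics" 0 (· + 1)
  else if PySem.Str.isIn "multi" r || PySem.Str.isIn "multiple_person" r then
    d.modify "multiple_person" 0 (· + 1)
  else if PySem.Str.isIn "face_mismatch" r then
    d.modify "face_mismatch" 0 (· + 1)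
  else if PySem.Str.isIn "speech" r then
    d.modify "speech" 0 (· + 1)
  else if PySem.Str.isIn "side_glance" r || PySem.Str.isIn "excessive_side_glances" r then
    d.modify "side_glance" 0 (· + 1)
  else if PySem.Str.isIn "object_warning" r then
    d.modify "object_warning" 0 (· + 1)
  else if PySem.Str.isIn "ai_looking_away" r || PySem.Str.isIn "lstm" r then
    d.modify "ai_looking_away" 0 (· + 1)
  else d

def analyze_by_rules (incidents : List (String × String × String × Option String × String)) (logs : List String) : List (String × Int) :=
  let incident_counts : PySem.Dict String Int := PySem.Dict.ofList
    [("cell_phone", 0), ("electronics", 0), ("multiple_person", 0), ("face_mismatch", 0),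
     ("speech", 0), ("side_glance", 0), ("object_warning", 0), ("ai_looking_away", 0),
     ("total_incidents", 0)]
  (incidents.foldl pvStepA incident_counts).items

-- ===== PORT B =====
def pvRules : List (String × List String) :=
  [("cell_phone", ["cell_phone", "phone"]),
   ("electronics", ["laptop", "tablet", "headphones", "earphones", "remote", "mouse", "keyboard"]),
   ("multiple_person", ["multi", "multiple_person"]),
   ("face_mismatch", ["face_mismatch"]),
   ("speech", ["speech"]),
   ("side_glance", ["side_glance", "excessive_side_glances"]),
   ("object_warning", ["object_warning"]),
   ("ai_looking_away", ["ai_looking_away", "lstm"])]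

def pvMatches (kws : List String) (r : String) : Bool := kws.any (fun k => PySem.Str.isIn k r)

-- Source B's loop body: a rule counts and removes from the pool what it matches
def pvStageB (st : PySem.Dict String Int × List String)
    (rule : String × List String) : PySem.Dict String Int × List String :=
  let matched := st.2.filter (fun r => pvMatches rule.2 r)
  let remaining := st.2.filter (fun r => !(pvMatches rule.2 r))
  (st.1.insert rule.1 (matched.length : Int), remaining)

def analyze_by_rules_alt (incidents : List (String × String × String × Option String × String)) (logs : List String) : List (String × Int) :=
  let counts : PySem.Dict String Int :=
    (PySem.Dict.ofList (pvRules.map (fun rule => (rule.1, (0 : Int))))).insert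
      "total_incidents" (incidents.length : Int)
  let remaining := incidents.map (fun inc => PySem.Str.lower (inc.2.2.2.1.getD ""))
  (pvRules.foldl pvStageB (counts, remaining)).1.items

-- ===== PRECONDITION & SPEC =====
def Spec_analyze_by_rules (incidents : List (String × String × String × Option String × String)) (logs : List String) (out : List (String × Int)) : Prop := out = analyze_by_rules_alt incidents logs
instance (incidents : List (String × String × String × Option String × String)) (logs : List String) (out : List (String × Int)) : Decidable (Spec_analyze_by_rules incidents logs out) := by unfold Spec_analyze_by_rules; infer_instance

-- ===== CLAIM (what is proved, stated in full; the proofs are below) =====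
def Claim_equal_analyze_by_rules : Prop := ∀ (incidents : List (String × String × String × Option String × String)) (logs : List String), Dom_analyze_by_rules incidents logs → Spec_analyze_by_rules incidents logs (analyze_by_rules incidents logs)

-- ===== LEMMAS AND PROOFS =====

-- first rule of `rules` whose some keyword occurs in r (the category A's elif chain picks)
def pvClassifyL (rules : List (String × List String)) (r : String) : Option String :=
  (rules.find? (fun rule => pvMatches rule.2 r)).map (fun rule => rule.1)

def pvClassify (reason : Option String) : Option String :=
  pvClassifyL pvRules (PySem.Str.lower (reason.getD ""))

-- 1 iff the first-match classifier puts this incident's reason in category cat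
def pvDelta (reason : Option String) (cat : String) : Int :=
  if pvClassify reason = some cat then 1 else 0

-- the dict A maintains, parametrised by its nine counter values
def pvDictOf (t c1 c2 c3 c4 c5 c6 c7 c8 : Int) : PySem.Dict String Int :=
  PySem.Dict.ofList
    [("cell_phone", c1), ("electronics", c2), ("multiple_person", c3), ("face_mismatch", c4),
     ("speech", c5), ("side_glance", c6), ("object_warning", c7), ("ai_looking_away", c8),
     ("total_incidents", t)]

lemma pvDictOf_eq (t c1 c2 c3 c4 c5 c6 c7 c8 : Int) : pvDictOf t c1 c2 c3 c4 c5 c6 c7 c8 =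
    PySem.Dict.mk
      [("cell_phone", c1), ("electronics", c2), ("multiple_person", c3), ("face_mismatch", c4),
       ("speech", c5), ("side_glance", c6), ("object_warning", c7), ("ai_looking_away", c8),
       ("total_incidents", t)] := by rfl

lemma pvElec_eq : pvElectronicsKeywords =
    ["laptop", "tablet", "headphones", "earphones", "remote", "mouse", "keyboard"] := by decide

set_option maxHeartbeats 1000000 in
lemma pvStepA_eq (t c1 c2 c3 c4 c5 c6 c7 c8 : Int)
    (inc : String × String × String × Option String × String) :
    pvStepA (pvDictOf t c1 c2 c3 c4 c5 c6 c7 c8) inc =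
      pvDictOf (t + 1)
        (c1 + pvDelta inc.2.2.2.1 "cell_phone") (c2 + pvDelta inc.2.2.2.1 "electronics")
        (c3 + pvDelta inc.2.2.2.1 "multiple_person") (c4 + pvDelta inc.2.2.2.1 "face_mismatch")
        (c5 + pvDelta inc.2.2.2.1 "speech") (c6 + pvDelta inc.2.2.2.1 "side_glance")
        (c7 + pvDelta inc.2.2.2.1 "object_warning") (c8 + pvDelta inc.2.2.2.1 "ai_looking_away") := by
  obtain ⟨i1, ts, sev, reason, ev⟩ := inc
  rw [pvDictOf_eq, pvDictOf_eq]
  by_cases h1 : PySem.Str.isIn "cell_phone" (PySem.Str.lower (reason.getD "")) = true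
  · simp_all [pvStepA, pvDelta, pvClassify, pvClassifyL, pvMatches, pvRules, pvElec_eq, List.find?_cons, PySem.Dict.modify, PySem.Dict.insert, PySem.Dict.getD, PySem.Dict.get?, PySem.Dict.contains]
  by_cases h2 : PySem.Str.isIn "phone" (PySem.Str.lower (reason.getD "")) = true
  · simp_all [pvStepA, pvDelta, pvClassify, pvClassifyL, pvMatches, pvRules, pvElec_eq, List.find?_cons, PySem.Dict.modify, PySem.Dict.insert, PySem.Dict.getD, PySem.Dict.get?, PySem.Dict.contains]
  by_cases h3 : PySem.Str.isIn "laptop" (PySem.Str.lower (reason.getD "")) = true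
  · simp_all [pvStepA, pvDelta, pvClassify, pvClassifyL, pvMatches, pvRules, pvElec_eq, List.find?_cons, PySem.Dict.modify, PySem.Dict.insert, PySem.Dict.getD, PySem.Dict.get?, PySem.Dict.contains]
  by_cases h4 : PySem.Str.isIn "tablet" (PySem.Str.lower (reason.getD "")) = true
  · simp_all [pvStepA, pvDelta, pvClassify, pvClassifyL, pvMatches, pvRules, pvElec_eq, List.find?_cons, PySem.Dict.modify, PySem.Dict.insert, PySem.Dict.getD, PySem.Dict.get?, PySem.Dict.contains]
  by_cases h5 : PySem.Str.isIn "headphones" (PySem.Str.lower (reason.getD "")) = true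
  · simp_all [pvStepA, pvDelta, pvClassify, pvClassifyL, pvMatches, pvRules, pvElec_eq, List.find?_cons, PySem.Dict.modify, PySem.Dict.insert, PySem.Dict.getD, PySem.Dict.get?, PySem.Dict.contains]
  by_cases h6 : PySem.Str.isIn "earphones" (PySem.Str.lower (reason.getD "")) = true
  · simp_all [pvStepA, pvDelta, pvClassify, pvClassifyL, pvMatches, pvRules, pvElec_eq, List.find?_cons, PySem.Dict.modify, PySem.Dict.insert, PySem.Dict.getD, PySem.Dict.get?, PySem.Dict.contains]
  by_cases h7 : PySem.Str.isIn "remote" (PySem.Str.lower (reason.getD "")) = true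
  · simp_all [pvStepA, pvDelta, pvClassify, pvClassifyL, pvMatches, pvRules, pvElec_eq, List.find?_cons, PySem.Dict.modify, PySem.Dict.insert, PySem.Dict.getD, PySem.Dict.get?, PySem.Dict.contains]
  by_cases h8 : PySem.Str.isIn "mouse" (PySem.Str.lower (reason.getD "")) = true
  · simp_all [pvStepA, pvDelta, pvClassify, pvClassifyL, pvMatches, pvRules, pvElec_eq, List.find?_cons, PySem.Dict.modify, PySem.Dict.insert, PySem.Dict.getD, PySem.Dict.get?, PySem.Dict.contains]
  by_cases h9 : PySem.Str.isIn "keyboard" (PySem.Str.lower (reason.getD "")) = true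
  · simp_all [pvStepA, pvDelta, pvClassify, pvClassifyL, pvMatches, pvRules, pvElec_eq, List.find?_cons, PySem.Dict.modify, PySem.Dict.insert, PySem.Dict.getD, PySem.Dict.get?, PySem.Dict.contains]
  by_cases h10 : PySem.Str.isIn "multi" (PySem.Str.lower (reason.getD "")) = true
  · simp_all [pvStepA, pvDelta, pvClassify, pvClassifyL, pvMatches, pvRules, pvElec_eq, List.find?_cons, PySem.Dict.modify, PySem.Dict.insert, PySem.Dict.getD, PySem.Dict.get?, PySem.Dict.contains]
  by_cases h11 : PySem.Str.isIn "multiple_person" (PySem.Str.lower (reason.getD "")) = true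
  · simp_all [pvStepA, pvDelta, pvClassify, pvClassifyL, pvMatches, pvRules, pvElec_eq, List.find?_cons, PySem.Dict.modify, PySem.Dict.insert, PySem.Dict.getD, PySem.Dict.get?, PySem.Dict.contains]
  by_cases h12 : PySem.Str.isIn "face_mismatch" (PySem.Str.lower (reason.getD "")) = true
  · simp_all [pvStepA, pvDelta, pvClassify, pvClassifyL, pvMatches, pvRules, pvElec_eq, List.find?_cons, PySem.Dict.modify, PySem.Dict.insert, PySem.Dict.getD, PySem.Dict.get?, PySem.Dict.contains]
  by_cases h13 : PySem.Str.isIn "speech" (PySem.Str.lower (reason.getD "")) = true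
  · simp_all [pvStepA, pvDelta, pvClassify, pvClassifyL, pvMatches, pvRules, pvElec_eq, List.find?_cons, PySem.Dict.modify, PySem.Dict.insert, PySem.Dict.getD, PySem.Dict.get?, PySem.Dict.contains]
  by_cases h14 : PySem.Str.isIn "side_glance" (PySem.Str.lower (reason.getD "")) = true
  · simp_all [pvStepA, pvDelta, pvClassify, pvClassifyL, pvMatches, pvRules, pvElec_eq, List.find?_cons, PySem.Dict.modify, PySem.Dict.insert, PySem.Dict.getD, PySem.Dict.get?, PySem.Dict.contains]
  by_cases h15 : PySem.Str.isIn "excessive_side_glances" (PySem.Str.lower (reason.getD "")) = true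
  · simp_all [pvStepA, pvDelta, pvClassify, pvClassifyL, pvMatches, pvRules, pvElec_eq, List.find?_cons, PySem.Dict.modify, PySem.Dict.insert, PySem.Dict.getD, PySem.Dict.get?, PySem.Dict.contains]
  by_cases h16 : PySem.Str.isIn "object_warning" (PySem.Str.lower (reason.getD "")) = true
  · simp_all [pvStepA, pvDelta, pvClassify, pvClassifyL, pvMatches, pvRules, pvElec_eq, List.find?_cons, PySem.Dict.modify, PySem.Dict.insert, PySem.Dict.getD, PySem.Dict.get?, PySem.Dict.contains]
  by_cases h17 : PySem.Str.isIn "ai_looking_away" (PySem.Str.lower (reason.getD "")) = true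
  · simp_all [pvStepA, pvDelta, pvClassify, pvClassifyL, pvMatches, pvRules, pvElec_eq, List.find?_cons, PySem.Dict.modify, PySem.Dict.insert, PySem.Dict.getD, PySem.Dict.get?, PySem.Dict.contains]
  by_cases h18 : PySem.Str.isIn "lstm" (PySem.Str.lower (reason.getD "")) = true
  · simp_all [pvStepA, pvDelta, pvClassify, pvClassifyL, pvMatches, pvRules, pvElec_eq, List.find?_cons, PySem.Dict.modify, PySem.Dict.insert, PySem.Dict.getD, PySem.Dict.get?, PySem.Dict.contains]
  simp_all [pvStepA, pvDelta, pvClassify, pvClassifyL, pvMatches, pvRules, pvElec_eq, List.find?_cons, PySem.Dict.modify, PySem.Dict.insert, PySem.Dict.getD, PySem.Dict.get?, PySem.Dict.contains]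

lemma pvFold_eq (l : List (String × String × String × Option String × String))
    (t c1 c2 c3 c4 c5 c6 c7 c8 : Int) :
    l.foldl pvStepA (pvDictOf t c1 c2 c3 c4 c5 c6 c7 c8) =
      pvDictOf (t + l.length)
        (c1 + ((l.map (fun inc => pvClassify inc.2.2.2.1)).count (some "cell_phone") : Int))
        (c2 + ((l.map (fun inc => pvClassify inc.2.2.2.1)).count (some "electronics") : Int))
        (c3 + ((l.map (fun inc => pvClassify inc.2.2.2.1)).count (some "multiple_person") : Int))
        (c4 + ((l.map (fun inc => pvClassify inc.2.2.2.1)).count (some "face_mismatch") : Int))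
        (c5 + ((l.map (fun inc => pvClassify inc.2.2.2.1)).count (some "speech") : Int))
        (c6 + ((l.map (fun inc => pvClassify inc.2.2.2.1)).count (some "side_glance") : Int))
        (c7 + ((l.map (fun inc => pvClassify inc.2.2.2.1)).count (some "object_warning") : Int))
        (c8 + ((l.map (fun inc => pvClassify inc.2.2.2.1)).count (some "ai_looking_away") : Int)) := by
  induction l generalizing t c1 c2 c3 c4 c5 c6 c7 c8 with
  | nil => simp
  | cons a l ih =>
    simp only [List.foldl_cons, pvStepA_eq, ih, List.map_cons, List.count_cons,
      List.length_cons, beq_iff_eq]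
    rw [pvDictOf_eq, pvDictOf_eq]
    simp only [PySem.Dict.mk.injEq, List.cons.injEq, Prod.mk.injEq, true_and, and_true]
    push_cast
    refine ⟨?_, ?_, ?_, ?_, ?_, ?_, ?_, ?_, ?_⟩
    case refine_1 => simp only [pvDelta]; split_ifs <;> ring
    case refine_2 => simp only [pvDelta]; split_ifs <;> ring
    case refine_3 => simp only [pvDelta]; split_ifs <;> ring
    case refine_4 => simp only [pvDelta]; split_ifs <;> ring
    case refine_5 => simp only [pvDelta]; split_ifs <;> ring
    case refine_6 => simp only [pvDelta]; split_ifs <;> ring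
    case refine_7 => simp only [pvDelta]; split_ifs <;> ring
    case refine_8 => simp only [pvDelta]; split_ifs <;> ring
    case refine_9 => ring

-- classifying against (rule :: rules): rows matching rule never count toward another category
lemma pvCount_tail (rule : String × List String) (rules : List (String × List String))
    (rs : List String) (c : String) (hc : c ≠ rule.1) :
    (rs.map (pvClassifyL (rule :: rules))).count (some c) =
      ((rs.filter (fun r => !(pvMatches rule.2 r))).map (pvClassifyL rules)).count (some c) := by
  induction rs with
  | nil => simp
  | cons a rs ih =>
    by_cases h : pvMatches rule.2 a = true
    · simp [pvClassifyL, List.find?_cons, h, ih, List.count_cons, hc, Ne.symm hc]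
    · simp only [Bool.not_eq_true] at h
      simp [pvClassifyL, List.find?_cons, h, ih, List.count_cons]

-- classifying against (rule :: rules): rule's own count is exactly the rows it matches
lemma pvCount_head (rule : String × List String) (rules : List (String × List String))
    (rs : List String) (hn : ∀ p ∈ rules, p.1 ≠ rule.1) :
    (rs.map (pvClassifyL (rule :: rules))).count (some rule.1) =
      (rs.filter (fun r => pvMatches rule.2 r)).length := by
  induction rs with
  | nil => simp
  | cons a rs ih =>
    by_cases h : pvMatches rule.2 a = true
    · simp [pvClassifyL, List.find?_cons, h, ih, List.count_cons]
    · simp only [Bool.not_eq_true] at h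
      have hstep : pvClassifyL (rule :: rules) a = pvClassifyL rules a := by
        simp [pvClassifyL, List.find?_cons, h]
      have hne : (pvClassifyL rules a == some rule.1) = false := by
        cases hFind : rules.find? (fun p => pvMatches p.2 a) with
        | none => simp [pvClassifyL, hFind]
        | some p =>
          simp [pvClassifyL, hFind]
          exact hn p (List.mem_of_find?_eq_some hFind)
      simp [List.map_cons, List.count_cons, hstep, hne, ih, List.filter_cons, h]

lemma pvCnt_cell_phone (rs : List String) :
    (rs.map (pvClassifyL [("cell_phone", ["cell_phone", "phone"]), ("electronics", ["laptop", "tablet", "headphones", "earphones", "remote", "mouse", "keyboard"]), ("multiple_person", ["multi", "multiple_person"]), ("face_mismatch", ["face_mismatch"]), ("speech", ["speech"]), ("side_glance", ["side_glance", "excessive_side_glances"]), ("object_warning", ["object_warning"]), ("ai_looking_away", ["ai_looking_away", "lstm"])])).count (some "cell_phone") =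
      (rs.filter (fun a => pvMatches ["cell_phone", "phone"] a)).length := by
  rw [pvCount_head ("cell_phone", ["cell_phone", "phone"]) [("electronics", ["laptop", "tablet", "headphones", "earphones", "remote", "mouse", "keyboard"]), ("multiple_person", ["multi", "multiple_person"]), ("face_mismatch", ["face_mismatch"]), ("speech", ["speech"]), ("side_glance", ["side_glance", "excessive_side_glances"]), ("object_warning", ["object_warning"]), ("ai_looking_away", ["ai_looking_away", "lstm"])] _ (by decide)]

lemma pvCnt_electronics (rs : List String) :
    (rs.map (pvClassifyL [("cell_phone", ["cell_phone", "phone"]), ("electronics", ["laptop", "tablet", "headphones", "earphones", "remote", "mouse", "keyboard"]), ("multiple_person", ["multi", "multiple_person"]), ("face_mismatch", ["face_mismatch"]), ("speech", ["speech"]), ("side_glance", ["side_glance", "excessive_side_glances"]), ("object_warning", ["object_warning"]), ("ai_looking_away", ["ai_looking_away", "lstm"])])).count (some "electronics") =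
      (rs.filter (fun a => pvMatches ["laptop", "tablet", "headphones", "earphones", "remote", "mouse", "keyboard"] a && (!pvMatches ["cell_phone", "phone"] a))).length := by
  rw [pvCount_tail _ _ _ _ (by decide), pvCount_head ("electronics", ["laptop", "tablet", "headphones", "earphones", "remote", "mouse", "keyboard"]) [("multiple_person", ["multi", "multiple_person"]), ("face_mismatch", ["face_mismatch"]), ("speech", ["speech"]), ("side_glance", ["side_glance", "excessive_side_glances"]), ("object_warning", ["object_warning"]), ("ai_looking_away", ["ai_looking_away", "lstm"])] _ (by decide)]
  simp only [List.filter_filter]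

lemma pvCnt_multiple_person (rs : List String) :
    (rs.map (pvClassifyL [("cell_phone", ["cell_phone", "phone"]), ("electronics", ["laptop", "tablet", "headphones", "earphones", "remote", "mouse", "keyboard"]), ("multiple_person", ["multi", "multiple_person"]), ("face_mismatch", ["face_mismatch"]), ("speech", ["speech"]), ("side_glance", ["side_glance", "excessive_side_glances"]), ("object_warning", ["object_warning"]), ("ai_looking_away", ["ai_looking_away", "lstm"])])).count (some "multiple_person") =
      (rs.filter (fun a => pvMatches ["multi", "multiple_person"] a && (!pvMatches ["laptop", "tablet", "headphones", "earphones", "remote", "mouse", "keyboard"] a && (!pvMatches ["cell_phone", "phone"] a)))).length := by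
  rw [pvCount_tail _ _ _ _ (by decide), pvCount_tail _ _ _ _ (by decide), pvCount_head ("multiple_person", ["multi", "multiple_person"]) [("face_mismatch", ["face_mismatch"]), ("speech", ["speech"]), ("side_glance", ["side_glance", "excessive_side_glances"]), ("object_warning", ["object_warning"]), ("ai_looking_away", ["ai_looking_away", "lstm"])] _ (by decide)]
  simp only [List.filter_filter]

lemma pvCnt_face_mismatch (rs : List String) :
    (rs.map (pvClassifyL [("cell_phone", ["cell_phone", "phone"]), ("electronics", ["laptop", "tablet", "headphones", "earphones", "remote", "mouse", "keyboard"]), ("multiple_person", ["multi", "multiple_person"]), ("face_mismatch", ["face_mismatch"]), ("speech", ["speech"]), ("side_glance", ["side_glance", "excessive_side_glances"]), ("object_warning", ["object_warning"]), ("ai_looking_away", ["ai_looking_away", "lstm"])])).count (some "face_mismatch") =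
      (rs.filter (fun a => pvMatches ["face_mismatch"] a && (!pvMatches ["multi", "multiple_person"] a && (!pvMatches ["laptop", "tablet", "headphones", "earphones", "remote", "mouse", "keyboard"] a && (!pvMatches ["cell_phone", "phone"] a))))).length := by
  rw [pvCount_tail _ _ _ _ (by decide), pvCount_tail _ _ _ _ (by decide), pvCount_tail _ _ _ _ (by decide), pvCount_head ("face_mismatch", ["face_mismatch"]) [("speech", ["speech"]), ("side_glance", ["side_glance", "excessive_side_glances"]), ("object_warning", ["object_warning"]), ("ai_looking_away", ["ai_looking_away", "lstm"])] _ (by decide)]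
  simp only [List.filter_filter]

lemma pvCnt_speech (rs : List String) :
    (rs.map (pvClassifyL [("cell_phone", ["cell_phone", "phone"]), ("electronics", ["laptop", "tablet", "headphones", "earphones", "remote", "mouse", "keyboard"]), ("multiple_person", ["multi", "multiple_person"]), ("face_mismatch", ["face_mismatch"]), ("speech", ["speech"]), ("side_glance", ["side_glance", "excessive_side_glances"]), ("object_warning", ["object_warning"]), ("ai_looking_away", ["ai_looking_away", "lstm"])])).count (some "speech") =
      (rs.filter (fun a => pvMatches ["speech"] a && (!pvMatches ["face_mismatch"] a && (!pvMatches ["multi", "multiple_person"] a && (!pvMatches ["laptop", "tablet", "headphones", "earphones", "remote", "mouse", "keyboard"] a && (!pvMatches ["cell_phone", "phone"] a)))))).length := by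
  rw [pvCount_tail _ _ _ _ (by decide), pvCount_tail _ _ _ _ (by decide), pvCount_tail _ _ _ _ (by decide), pvCount_tail _ _ _ _ (by decide), pvCount_head ("speech", ["speech"]) [("side_glance", ["side_glance", "excessive_side_glances"]), ("object_warning", ["object_warning"]), ("ai_looking_away", ["ai_looking_away", "lstm"])] _ (by decide)]
  simp only [List.filter_filter]

lemma pvCnt_side_glance (rs : List String) :
    (rs.map (pvClassifyL [("cell_phone", ["cell_phone", "phone"]), ("electronics", ["laptop", "tablet", "headphones", "earphones", "remote", "mouse", "keyboard"]), ("multiple_person", ["multi", "multiple_person"]), ("face_mismatch", ["face_mismatch"]), ("speech", ["speech"]), ("side_glance", ["side_glance", "excessive_side_glances"]), ("object_warning", ["object_warning"]), ("ai_looking_away", ["ai_looking_away", "lstm"])])).count (some "side_glance") =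
      (rs.filter (fun a => pvMatches ["side_glance", "excessive_side_glances"] a && (!pvMatches ["speech"] a && (!pvMatches ["face_mismatch"] a && (!pvMatches ["multi", "multiple_person"] a && (!pvMatches ["laptop", "tablet", "headphones", "earphones", "remote", "mouse", "keyboard"] a && (!pvMatches ["cell_phone", "phone"] a))))))).length := by
  rw [pvCount_tail _ _ _ _ (by decide), pvCount_tail _ _ _ _ (by decide), pvCount_tail _ _ _ _ (by decide), pvCount_tail _ _ _ _ (by decide), pvCount_tail _ _ _ _ (by decide), pvCount_head ("side_glance", ["side_glance", "excessive_side_glances"]) [("object_warning", ["object_warning"]), ("ai_looking_away", ["ai_looking_away", "lstm"])] _ (by decide)]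
  simp only [List.filter_filter]

lemma pvCnt_object_warning (rs : List String) :
    (rs.map (pvClassifyL [("cell_phone", ["cell_phone", "phone"]), ("electronics", ["laptop", "tablet", "headphones", "earphones", "remote", "mouse", "keyboard"]), ("multiple_person", ["multi", "multiple_person"]), ("face_mismatch", ["face_mismatch"]), ("speech", ["speech"]), ("side_glance", ["side_glance", "excessive_side_glances"]), ("object_warning", ["object_warning"]), ("ai_looking_away", ["ai_looking_away", "lstm"])])).count (some "object_warning") =
      (rs.filter (fun a => pvMatches ["object_warning"] a && (!pvMatches ["side_glance", "excessive_side_glances"] a && (!pvMatches ["speech"] a && (!pvMatches ["face_mismatch"] a && (!pvMatches ["multi", "multiple_person"] a && (!pvMatches ["laptop", "tablet", "headphones", "earphones", "remote", "mouse", "keyboard"] a && (!pvMatches ["cell_phone", "phone"] a)))))))).length := by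
  rw [pvCount_tail _ _ _ _ (by decide), pvCount_tail _ _ _ _ (by decide), pvCount_tail _ _ _ _ (by decide), pvCount_tail _ _ _ _ (by decide), pvCount_tail _ _ _ _ (by decide), pvCount_tail _ _ _ _ (by decide), pvCount_head ("object_warning", ["object_warning"]) [("ai_looking_away", ["ai_looking_away", "lstm"])] _ (by decide)]
  simp only [List.filter_filter]

lemma pvCnt_ai_looking_away (rs : List String) :
    (rs.map (pvClassifyL [("cell_phone", ["cell_phone", "phone"]), ("electronics", ["laptop", "tablet", "headphones", "earphones", "remote", "mouse", "keyboard"]), ("multiple_person", ["multi", "multiple_person"]), ("face_mismatch", ["face_mismatch"]), ("speech", ["speech"]), ("side_glance", ["side_glance", "excessive_side_glances"]), ("object_warning", ["object_warning"]), ("ai_looking_away", ["ai_looking_away", "lstm"])])).count (some "ai_looking_away") =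
      (rs.filter (fun a => pvMatches ["ai_looking_away", "lstm"] a && (!pvMatches ["object_warning"] a && (!pvMatches ["side_glance", "excessive_side_glances"] a && (!pvMatches ["speech"] a && (!pvMatches ["face_mismatch"] a && (!pvMatches ["multi", "multiple_person"] a && (!pvMatches ["laptop", "tablet", "headphones", "earphones", "remote", "mouse", "keyboard"] a && (!pvMatches ["cell_phone", "phone"] a))))))))).length := by
  rw [pvCount_tail _ _ _ _ (by decide), pvCount_tail _ _ _ _ (by decide), pvCount_tail _ _ _ _ (by decide), pvCount_tail _ _ _ _ (by decide), pvCount_tail _ _ _ _ (by decide), pvCount_tail _ _ _ _ (by decide), pvCount_tail _ _ _ _ (by decide), pvCount_head ("ai_looking_away", ["ai_looking_away", "lstm"]) [] _ (by decide)]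
  simp only [List.filter_filter]


-- ===== VERDICT (by name: the statement is the Claim_ definition above) =====
set_option maxHeartbeats 8000000 in
theorem analyze_by_rules_spec : Claim_equal_analyze_by_rules := by
  intro incidents logs _
  show (incidents.foldl pvStepA (pvDictOf 0 0 0 0 0 0 0 0 0)).items = analyze_by_rules_alt incidents logs
  rw [pvFold_eq, pvDictOf_eq]
  have hmap : ∀ c : String,
      (incidents.map (fun inc => pvClassify inc.2.2.2.1)).count (some c) =
        ((incidents.map (fun inc => PySem.Str.lower (inc.2.2.2.1.getD ""))).map
          (pvClassifyL pvRules)).count (some c) := by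
    intro c; rw [List.map_map]; rfl
  simp only [hmap]
  simp only [analyze_by_rules_alt, pvRules, List.foldl_cons, List.foldl_nil, pvStageB,
    List.map_cons, List.map_nil, List.filter_filter]
  rw [pvCnt_cell_phone, pvCnt_electronics, pvCnt_multiple_person, pvCnt_face_mismatch,
    pvCnt_speech, pvCnt_side_glance, pvCnt_object_warning, pvCnt_ai_looking_away]
  simp only [zero_add]
  rfl
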